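-- pv_equiv track=rewrite | github.com/Brain-Engine/neural-genesis-code-generator | framework_analyse/frontend_json_analyse.py | forward_analyse
-- ===== SOURCE A (Python) =====
-- def forward_analyse(attr_dict: dict, edge_dict: dict):
--     input_id = 'x'
--     output_id = 'x'
--     forward_list=[]
--     for source in edge_dict:
--         output_id = source
--         forward_list.append(f"{output_id} = {attr_dict[output_id]['name']}({input_id})")
--         input_id = output_id
--
--     return forward_list, output_id
-- ===== SOURCE B (Python) =====
-- def forward_analyse(attr_dict: dict, edge_dict: dict):
--     def build(prev, rest):
--         if not rest:
--             return [], prev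
--         k = rest[0]
--         tail_lines, out = build(k, rest[1:])
--         return [f"{k} = {attr_dict[k]['name']}({prev})"] + tail_lines, out
--     return build('x', list(edge_dict))
-- ===== Notes on version B (the rewrite author's own statement) =====
-- stated objective: alternative
-- what changed: Replaces A's iterative loop threading an input_id/output_id accumulator with a structural recursion on the key list that prepends each line and returns the final output id back up the call stack.
import Mathlib
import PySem

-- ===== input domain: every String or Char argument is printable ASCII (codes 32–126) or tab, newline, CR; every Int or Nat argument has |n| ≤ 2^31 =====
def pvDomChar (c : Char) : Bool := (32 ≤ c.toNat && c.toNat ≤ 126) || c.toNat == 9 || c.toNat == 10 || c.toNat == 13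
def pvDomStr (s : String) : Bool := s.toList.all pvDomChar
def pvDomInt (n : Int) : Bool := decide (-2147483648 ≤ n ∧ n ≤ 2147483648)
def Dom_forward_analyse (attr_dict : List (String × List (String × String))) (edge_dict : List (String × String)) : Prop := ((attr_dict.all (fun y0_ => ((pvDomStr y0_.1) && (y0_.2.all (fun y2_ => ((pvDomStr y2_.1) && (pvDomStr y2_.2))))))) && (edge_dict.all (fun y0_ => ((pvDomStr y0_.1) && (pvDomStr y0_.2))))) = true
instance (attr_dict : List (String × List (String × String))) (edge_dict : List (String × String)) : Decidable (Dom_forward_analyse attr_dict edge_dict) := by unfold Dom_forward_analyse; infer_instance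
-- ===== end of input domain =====

-- B replaces A's accumulator-threaded loop with a structural recursion that prepends each line
-- and passes the final output id back up the call stack; objective: alternative decomposition.


-- ===== PORT A =====
-- attr_dict[k]['name'] with first-match assoc lookup; total via defaults, guarded by Pre_ (Python raises KeyError there)
def pvName (attr_dict : List (String × List (String × String))) (k : String) : String :=
  ((List.lookup k attr_dict).getD []).lookup "name" |>.getD ""

def forward_analyse (attr_dict : List (String × List (String × String))) (edge_dict : List (String × String)) : List String × String :=
  let st := edge_dict.foldl
    (fun (st : String × String × List String) p =>
      let source := p.1
      let line := source ++ " = " ++ pvName attr_dict source ++ "(" ++ st.1 ++ ")"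
      (source, source, st.2.2 ++ [line]))
    ("x", "x", [])
  (st.2.2, st.2.1)

-- ===== PORT B =====
-- structural recursion of Source B's inner `build(prev, rest)`
def pvBuild (attr_dict : List (String × List (String × String))) (prev : String) : List (String × String) → List String × String
  | [] => ([], prev)
  | p :: rest =>
    let k := p.1
    let r := pvBuild attr_dict k rest
    ((k ++ " = " ++ pvName attr_dict k ++ "(" ++ prev ++ ")") :: r.1, r.2)

def forward_analyse_alt (attr_dict : List (String × List (String × String))) (edge_dict : List (String × String)) : List String × String :=
  pvBuild attr_dict "x" edge_dict

-- ===== PRECONDITION & SPEC =====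
-- Pre_ excludes exactly the inputs where Python A raises KeyError: an edge key missing from
-- attr_dict, or whose attr entry lacks a 'name' key (first-match assoc lookup).
def Pre_forward_analyse (attr_dict : List (String × List (String × String))) (edge_dict : List (String × String)) : Prop :=
  (edge_dict.all (fun p =>
    match List.lookup p.1 attr_dict with
    | some inner => (List.lookup "name" inner).isSome
    | none => false)) = true
instance (attr_dict : List (String × List (String × String))) (edge_dict : List (String × String)) : Decidable (Pre_forward_analyse attr_dict edge_dict) := by unfold Pre_forward_analyse; infer_instance

def pvWitness_forward_analyse : (List (String × List (String × String))) × (List (String × String)) :=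
  ([("a", [("name", "Conv")]), ("b", [("name", "ReLU")])], [("a", "b"), ("b", "a")])

def Spec_forward_analyse (attr_dict : List (String × List (String × String))) (edge_dict : List (String × String)) (out : List String × String) : Prop := out = forward_analyse_alt attr_dict edge_dict
instance (attr_dict : List (String × List (String × String))) (edge_dict : List (String × String)) (out : List String × String) : Decidable (Spec_forward_analyse attr_dict edge_dict out) := by unfold Spec_forward_analyse; infer_instance

-- ===== CLAIM (what is proved, stated in full; the proofs are below) =====
def Claim_equal_forward_analyse : Prop := ∀ (attr_dict : List (String × List (String × String))) (edge_dict : List (String × String)), Dom_forward_analyse attr_dict edge_dict → Pre_forward_analyse attr_dict edge_dict → Spec_forward_analyse attr_dict edge_dict (forward_analyse attr_dict edge_dict)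

-- ===== LEMMAS AND PROOFS =====
-- Loop invariant: A's fold, started from (inp, inp, acc), yields exactly B's recursion from inp,
-- with its lines appended to acc and its output id in both threaded slots.
lemma forward_loop_eq (attr_dict : List (String × List (String × String)))
    (ps : List (String × String)) (inp : String) (acc : List String) :
    ps.foldl
      (fun (st : String × String × List String) p =>
        let source := p.1
        let line := source ++ " = " ++ pvName attr_dict source ++ "(" ++ st.1 ++ ")"
        (source, source, st.2.2 ++ [line]))
      (inp, inp, acc)
    = ((pvBuild attr_dict inp ps).2, (pvBuild attr_dict inp ps).2,
       acc ++ (pvBuild attr_dict inp ps).1) := by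
  induction ps generalizing inp acc with
  | nil => simp [pvBuild]
  | cons p rest ih => simp [pvBuild, ih]

-- ===== VERDICT (by name: the statement is the Claim_ definition above) =====
theorem forward_analyse_spec : Claim_equal_forward_analyse := by
  intro attr_dict edge_dict _ _
  show _ = _
  simp [forward_analyse, forward_analyse_alt, forward_loop_eq]
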